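-- pv_equiv track=rewrite | github.com/mzazon/awesome-cloud-projects | aws/security-automation/code/terraform/lambda_code/triage.py | determine_response_action
-- ===== SOURCE A (Python) =====
-- def determine_response_action(finding, severity):
--     """
--     Determine appropriate automated response based on finding characteristics
--     """
--     finding_type = finding.get('Types', [])
--
--     # High severity findings require immediate response
--     if severity in ['HIGH', 'CRITICAL']:
--         if any('UnauthorizedAPICall' in t for t in finding_type):
--             return 'ISOLATE_INSTANCE'
--         elif any('NetworkReachability' in t for t in finding_type):
--             return 'BLOCK_NETWORK_ACCESS'
--         elif any('Malware' in t for t in finding_type):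
--             return 'QUARANTINE_INSTANCE'
--
--     # Medium severity findings get automated remediation
--     elif severity == 'MEDIUM':
--         if any('MissingSecurityGroup' in t for t in finding_type):
--             return 'FIX_SECURITY_GROUP'
--         elif any('UnencryptedStorage' in t for t in finding_type):
--             return 'ENABLE_ENCRYPTION'
--
--     # Low severity findings get notifications only
--     return 'NOTIFY_ONLY'
-- ===== SOURCE B (Python) =====
-- _SUBS = {
--     'UnauthorizedAPICall': (0, 0, 'ISOLATE_INSTANCE'),
--     'NetworkReachability': (0, 1, 'BLOCK_NETWORK_ACCESS'),
--     'Malware': (0, 2, 'QUARANTINE_INSTANCE'),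
--     'MissingSecurityGroup': (1, 0, 'FIX_SECURITY_GROUP'),
--     'UnencryptedStorage': (1, 1, 'ENABLE_ENCRYPTION'),
-- }
--
-- _TIER = {'HIGH': 0, 'CRITICAL': 0, 'MEDIUM': 1}
--
--
-- def determine_response_action(finding, severity):
--     """Single pass over the finding's types, keeping the matched rule of
--     minimum priority (priority order equals the original branch order)."""
--     tier = _TIER.get(severity)
--     best = None
--     for t in finding.get('Types', []):
--         for sub, (tr, pri, action) in _SUBS.items():
--             if tr == tier and sub in t and (best is None or pri < best[0]):
--                 best = (pri, action)
--     return best[1] if best is not None else 'NOTIFY_ONLY'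
-- ===== Notes on version B (the rewrite author's own statement) =====
-- stated objective: alternative
-- what changed: Instead of testing the five severity/substring rules in branch order with an early return, B maps the severity to a tier, makes a single pass over the finding's Types accumulating the matched rule of minimum priority, and returns that rule's action (priority order equals A's branch order).
import Mathlib
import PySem

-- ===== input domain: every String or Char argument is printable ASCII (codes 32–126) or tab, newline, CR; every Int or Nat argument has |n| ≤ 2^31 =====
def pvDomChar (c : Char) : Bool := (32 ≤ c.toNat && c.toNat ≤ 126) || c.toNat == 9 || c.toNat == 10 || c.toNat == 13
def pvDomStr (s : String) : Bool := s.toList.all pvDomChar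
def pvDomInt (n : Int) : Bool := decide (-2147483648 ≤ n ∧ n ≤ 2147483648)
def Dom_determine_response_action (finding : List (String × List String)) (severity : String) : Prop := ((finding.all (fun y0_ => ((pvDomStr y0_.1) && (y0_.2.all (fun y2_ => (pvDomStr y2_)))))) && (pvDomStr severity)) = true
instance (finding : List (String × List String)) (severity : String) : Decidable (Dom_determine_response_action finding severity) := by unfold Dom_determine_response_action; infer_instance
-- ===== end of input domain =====

-- B replaces A's rule-order branch tree by a single pass over the finding's Types keeping the
-- matched rule of minimum priority (alternative decomposition, same cost); equivalence is proved below.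

-- ===== PORT A =====
def determine_response_action (finding : List (String × List String)) (severity : String) : String :=
  let finding_type := (PySem.Dict.mk finding).getD "Types" []
  if severity ∈ ["HIGH", "CRITICAL"] then
    if finding_type.any (fun t => PySem.Str.isIn "UnauthorizedAPICall" t) then "ISOLATE_INSTANCE"
    else if finding_type.any (fun t => PySem.Str.isIn "NetworkReachability" t) then "BLOCK_NETWORK_ACCESS"
    else if finding_type.any (fun t => PySem.Str.isIn "Malware" t) then "QUARANTINE_INSTANCE"
    else "NOTIFY_ONLY"
  else if severity == "MEDIUM" then
    if finding_type.any (fun t => PySem.Str.isIn "MissingSecurityGroup" t) then "FIX_SECURITY_GROUP"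
    else if finding_type.any (fun t => PySem.Str.isIn "UnencryptedStorage" t) then "ENABLE_ENCRYPTION"
    else "NOTIFY_ONLY"
  else "NOTIFY_ONLY"

-- ===== PORT B =====
-- _SUBS of Source B: substring ↦ (tier, priority, action)
def pvSubs : List (String × Int × Int × String) :=
  [ ("UnauthorizedAPICall", 0, 0, "ISOLATE_INSTANCE"),
    ("NetworkReachability", 0, 1, "BLOCK_NETWORK_ACCESS"),
    ("Malware", 0, 2, "QUARANTINE_INSTANCE"),
    ("MissingSecurityGroup", 1, 0, "FIX_SECURITY_GROUP"),
    ("UnencryptedStorage", 1, 1, "ENABLE_ENCRYPTION") ]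

-- _TIER.get(severity)
def pvTier (severity : String) : Option Int :=
  (PySem.Dict.mk [("HIGH", (0 : Int)), ("CRITICAL", 0), ("MEDIUM", 1)]).get? severity

-- the inner 'for sub, (tr, pri, action) in _SUBS.items()' loop body for one type string t
def pvStep (tier : Option Int) (best : Option (Int × String)) (t : String) : Option (Int × String) :=
  pvSubs.foldl (fun best item =>
    if (some item.2.1 == tier) && PySem.Str.isIn item.1 t &&
       (match best with | none => true | some b => decide (item.2.2.1 < b.1))
    then some (item.2.2.1, item.2.2.2) else best) best

def determine_response_action_alt (finding : List (String × List String)) (severity : String) : String :=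
  let tier := pvTier severity
  let types := (PySem.Dict.mk finding).getD "Types" []
  match types.foldl (pvStep tier) none with
  | some b => b.2
  | none => "NOTIFY_ONLY"

-- ===== PRECONDITION & SPEC =====
def Spec_determine_response_action (finding : List (String × List String)) (severity : String) (out : String) : Prop := out = determine_response_action_alt finding severity
instance (finding : List (String × List String)) (severity : String) (out : String) : Decidable (Spec_determine_response_action finding severity out) := by unfold Spec_determine_response_action; infer_instance

-- ===== CLAIM (what is proved, stated in full; the proofs are below) =====
def Claim_equal_determine_response_action : Prop := ∀ (finding : List (String × List String)) (severity : String), Dom_determine_response_action finding severity → Spec_determine_response_action finding severity (determine_response_action finding severity)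

-- ===== LEMMAS AND PROOFS =====

-- the accumulator's reachable values for tier 0 / tier 1
def pvInv0 (b : Option (Int × String)) : Prop :=
  b = none ∨ b = some (0, "ISOLATE_INSTANCE") ∨ b = some (1, "BLOCK_NETWORK_ACCESS") ∨ b = some (2, "QUARANTINE_INSTANCE")
def pvInv1 (b : Option (Int × String)) : Prop :=
  b = none ∨ b = some (0, "FIX_SECURITY_GROUP") ∨ b = some (1, "ENABLE_ENCRYPTION")

def pvIdx0 (b : Option (Int × String)) : Int := match b with | none => 3 | some x => x.1
def pvOf0 (i : Int) : Option (Int × String) :=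
  if i = 0 then some (0, "ISOLATE_INSTANCE") else if i = 1 then some (1, "BLOCK_NETWORK_ACCESS")
  else if i = 2 then some (2, "QUARANTINE_INSTANCE") else none
def pvExp0 (b : Option (Int × String)) (c0 c1 c2 : Bool) : Option (Int × String) :=
  pvOf0 (min (pvIdx0 b) (if c0 then 0 else if c1 then 1 else if c2 then 2 else 3))

def pvIdx1 (b : Option (Int × String)) : Int := match b with | none => 2 | some x => x.1
def pvOf1 (i : Int) : Option (Int × String) :=
  if i = 0 then some (0, "FIX_SECURITY_GROUP") else if i = 1 then some (1, "ENABLE_ENCRYPTION") else none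
def pvExp1 (b : Option (Int × String)) (c0 c1 : Bool) : Option (Int × String) :=
  pvOf1 (min (pvIdx1 b) (if c0 then 0 else if c1 then 1 else 2))

theorem pvStep0_eq (b : Option (Int × String)) (t : String) (hb : pvInv0 b) :
    pvStep (some 0) b t = pvExp0 b (PySem.Str.isIn "UnauthorizedAPICall" t)
      (PySem.Str.isIn "NetworkReachability" t) (PySem.Str.isIn "Malware" t) := by
  rcases hb with rfl | rfl | rfl | rfl <;>
    cases h0 : PySem.Str.isIn "UnauthorizedAPICall" t <;>
    cases h1 : PySem.Str.isIn "NetworkReachability" t <;>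
    cases h2 : PySem.Str.isIn "Malware" t <;>
    (simp only [pvStep, pvSubs, List.foldl_cons, List.foldl_nil, h0, h1, h2,
       show (some (1:Int) == some (0:Int)) = false from rfl, Bool.false_and, Bool.and_false,
       if_neg (by simp : ¬ (false = true))]; decide)

theorem pvStep1_eq (b : Option (Int × String)) (t : String) (hb : pvInv1 b) :
    pvStep (some 1) b t = pvExp1 b (PySem.Str.isIn "MissingSecurityGroup" t)
      (PySem.Str.isIn "UnencryptedStorage" t) := by
  rcases hb with rfl | rfl | rfl <;>
    cases h0 : PySem.Str.isIn "MissingSecurityGroup" t <;>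
    cases h1 : PySem.Str.isIn "UnencryptedStorage" t <;>
    (simp only [pvStep, pvSubs, List.foldl_cons, List.foldl_nil, h0, h1,
       show (some (0:Int) == some (1:Int)) = false from rfl, Bool.false_and, Bool.and_false,
       if_neg (by simp : ¬ (false = true))]; decide)

theorem pvInv0_exp (b : Option (Int × String)) (c0 c1 c2 : Bool) (hb : pvInv0 b) :
    pvInv0 (pvExp0 b c0 c1 c2) := by
  rcases hb with rfl | rfl | rfl | rfl <;> (revert c0 c1 c2; unfold pvInv0 pvExp0 pvOf0 pvIdx0; decide)

theorem pvInv1_exp (b : Option (Int × String)) (c0 c1 : Bool) (hb : pvInv1 b) :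
    pvInv1 (pvExp1 b c0 c1) := by
  rcases hb with rfl | rfl | rfl <;> (revert c0 c1; unfold pvInv1 pvExp1 pvOf1 pvIdx1; decide)

theorem pvExp0_exp0 (b : Option (Int × String)) (c0 c1 c2 a0 a1 a2 : Bool) (hb : pvInv0 b) :
    pvExp0 (pvExp0 b c0 c1 c2) a0 a1 a2 = pvExp0 b (c0 || a0) (c1 || a1) (c2 || a2) := by
  rcases hb with rfl | rfl | rfl | rfl <;> revert c0 c1 c2 a0 a1 a2 <;> decide

theorem pvExp1_exp1 (b : Option (Int × String)) (c0 c1 a0 a1 : Bool) (hb : pvInv1 b) :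
    pvExp1 (pvExp1 b c0 c1) a0 a1 = pvExp1 b (c0 || a0) (c1 || a1) := by
  rcases hb with rfl | rfl | rfl <;> revert c0 c1 a0 a1 <;> decide

theorem pvFold0 (ts : List String) : ∀ (b : Option (Int × String)), pvInv0 b →
    ts.foldl (pvStep (some 0)) b = pvExp0 b (ts.any (fun t => PySem.Str.isIn "UnauthorizedAPICall" t))
      (ts.any (fun t => PySem.Str.isIn "NetworkReachability" t))
      (ts.any (fun t => PySem.Str.isIn "Malware" t)) := by
  induction ts with
  | nil => intro b hb; rcases hb with rfl | rfl | rfl | rfl <;> decide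
  | cons t ts ih =>
    intro b hb
    simp only [List.foldl_cons, List.any_cons]
    rw [pvStep0_eq b t hb, ih _ (pvInv0_exp b _ _ _ hb), pvExp0_exp0 b _ _ _ _ _ _ hb]

theorem pvFold1 (ts : List String) : ∀ (b : Option (Int × String)), pvInv1 b →
    ts.foldl (pvStep (some 1)) b = pvExp1 b (ts.any (fun t => PySem.Str.isIn "MissingSecurityGroup" t))
      (ts.any (fun t => PySem.Str.isIn "UnencryptedStorage" t)) := by
  induction ts with
  | nil => intro b hb; rcases hb with rfl | rfl | rfl <;> decide
  | cons t ts ih =>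
    intro b hb
    simp only [List.foldl_cons, List.any_cons]
    rw [pvStep1_eq b t hb, ih _ (pvInv1_exp b _ _ hb), pvExp1_exp1 b _ _ _ _ hb]

theorem pvStep_none (b : Option (Int × String)) (t : String) : pvStep none b t = b := by
  simp [pvStep, pvSubs, List.foldl]

theorem pvFold_none (ts : List String) : ts.foldl (pvStep none) none = none := by
  induction ts with
  | nil => rfl
  | cons t ts ih => simp [List.foldl_cons, pvStep_none, ih]

-- ===== VERDICT (by name: the statement is the Claim_ definition above) =====
theorem determine_response_action_spec : Claim_equal_determine_response_action := by
  intro finding severity _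
  unfold Spec_determine_response_action determine_response_action determine_response_action_alt
  set ts := (PySem.Dict.mk finding).getD "Types" [] with hts
  clear hts
  by_cases hH : severity = "HIGH"
  · subst hH
    simp only [show pvTier "HIGH" = some 0 from by decide, pvFold0 ts none (Or.inl rfl)]
    cases h0 : ts.any (fun t => PySem.Str.isIn "UnauthorizedAPICall" t) <;>
      cases h1 : ts.any (fun t => PySem.Str.isIn "NetworkReachability" t) <;>
      cases h2 : ts.any (fun t => PySem.Str.isIn "Malware" t) <;>
      simp [h0, h1, h2, pvExp0, pvOf0, pvIdx0]
  · by_cases hC : severity = "CRITICAL"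
    · subst hC
      simp only [show pvTier "CRITICAL" = some 0 from by decide, pvFold0 ts none (Or.inl rfl)]
      cases h0 : ts.any (fun t => PySem.Str.isIn "UnauthorizedAPICall" t) <;>
        cases h1 : ts.any (fun t => PySem.Str.isIn "NetworkReachability" t) <;>
        cases h2 : ts.any (fun t => PySem.Str.isIn "Malware" t) <;>
        simp [h0, h1, h2, pvExp0, pvOf0, pvIdx0]
    · by_cases hM : severity = "MEDIUM"
      · subst hM
        simp only [show pvTier "MEDIUM" = some 1 from by decide, pvFold1 ts none (Or.inl rfl)]
        cases h0 : ts.any (fun t => PySem.Str.isIn "MissingSecurityGroup" t) <;>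
          cases h1 : ts.any (fun t => PySem.Str.isIn "UnencryptedStorage" t) <;>
          simp [h0, h1, pvExp1, pvOf1, pvIdx1]
      · have eH : ("HIGH" == severity) = false := by simp [Ne.symm hH]
        have eC : ("CRITICAL" == severity) = false := by simp [Ne.symm hC]
        have eM : ("MEDIUM" == severity) = false := by simp [Ne.symm hM]
        have htier : pvTier severity = none := by
          simp [pvTier, PySem.Dict.get?, eH, eC, eM]
        simp only [htier, pvFold_none]
        simp [hH, hC, hM]
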